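-- pv_equiv track=rewrite | github.com/nitingss11/CSE595 | EggDropping.py | minEggsAlgo3
-- ===== SOURCE A (Python) =====
-- import math
--
-- def minEggsAlgo3(n, d):
--     eggs = [[0] * (d + 1) for _ in range(n + 1)]
--     first_floor = [[0 for j in range(d + 1)] for i in range(n + 1)]  # one indexed
--
--     for i in range(n + 1):
--         for j in range(d + 1):
--             if i == 0:
--                 eggs[i][j] = 0
--                 first_floor[i][j] = 0
--             elif j >= i:
--                 eggs[i][j] = 1
--                 first_floor[i][j] = 1
--             else:
--                 val = math.log(i + 1, 2)
--                 if j < val: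
--                     eggs[i][j] = 9999
--                     first_floor[i][j] = 9999
--
--     for d1 in range(2, d + 1):
--         n1 = 2
--         i = 1
--         while (n1 <= n):
--             if (1 + eggs[i - 1][d1 - 1] >= eggs[n1 - i][d1 - 1]):
--                 val1 = max(1 + eggs[i - 1][d1 - 1], eggs[n1 - i][d1 - 1])
--                 eggs[n1][d1] = val1
--                 first_floor[n1][d1] = i
--
--                 if (i >= 2):
--                     val2 = max(1 + eggs[i - 2][d1 - 1], eggs[n1 - i + 1][d1 - 1])
--                     if val2 < val1:
--                         eggs[n1][d1] = val2
--                         first_floor[n1][d1] = i - 1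
--                 n1 += 1
--             else:
--                 i += 1
--
--     return eggs, first_floor
-- ===== SOURCE B (Python) =====
-- import math
--
--
-- def minEggsAlgo3(n, d):
--     eggs = [[0] * (d + 1) for _ in range(n + 1)]
--     first_floor = [[0] * (d + 1) for _ in range(n + 1)]
--
--     # same base table as the original (rows 0/1, the 1-band and the log sentinel)
--     for i in range(n + 1):
--         for j in range(d + 1):
--             if i == 0:
--                 pass  # row 0 is already all zeros
--             elif j >= i:
--                 eggs[i][j] = 1
--                 first_floor[i][j] = 1
--             elif j < math.log(i + 1, 2):
--                 eggs[i][j] = 9999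
--                 first_floor[i][j] = 9999
--
--     # per-cell binary search for the crossing split point (the column is nondecreasing),
--     # instead of the carried two-pointer of the original
--     for d1 in range(2, d + 1):
--         col = [row[d1 - 1] for row in eggs]
--         for n1 in range(2, n + 1):
--             lo, hi = 1, n1
--             while lo < hi:
--                 mid = (lo + hi) // 2
--                 if col[n1 - mid] <= 1 + col[mid - 1]:
--                     hi = mid
--                 else:
--                     lo = mid + 1
--             i = lo
--             if i >= 2 and col[n1 - i + 1] < 1 + col[i - 1]:
--                 eggs[n1][d1] = col[n1 - i + 1]
--                 first_floor[n1][d1] = i - 1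
--             else:
--                 eggs[n1][d1] = 1 + col[i - 1]
--                 first_floor[n1][d1] = i
--     return eggs, first_floor
-- ===== Notes on version B (the rewrite author's own statement) =====
-- stated objective: alternative
-- what changed: The stateful interleaved two-pointer while-loop (which carries the split pointer i across rows, mixing the row advance and the pointer advance in one loop) is replaced by an independent per-cell binary search: for each cell the crossing split point i (first k with eggs[n1-k][d1-1] <= 1 + eggs[k-1][d1-1], a condition that is monotone in k because each used column is nondecreasing) is recomputed from scratch by bisection, and the cell value/floor follow directly from it.
import Mathlib
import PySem

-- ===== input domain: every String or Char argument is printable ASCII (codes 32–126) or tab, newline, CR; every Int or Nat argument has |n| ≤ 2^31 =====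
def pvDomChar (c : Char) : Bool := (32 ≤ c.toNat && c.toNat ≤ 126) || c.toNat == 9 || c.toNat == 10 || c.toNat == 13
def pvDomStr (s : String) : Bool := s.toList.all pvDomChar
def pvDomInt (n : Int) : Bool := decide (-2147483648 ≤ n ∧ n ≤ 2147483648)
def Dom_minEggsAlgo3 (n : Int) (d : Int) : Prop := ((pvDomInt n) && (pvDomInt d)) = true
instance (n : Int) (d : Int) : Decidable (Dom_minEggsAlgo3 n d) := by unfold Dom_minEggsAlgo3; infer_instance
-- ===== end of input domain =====

-- B replaces the stateful carried two-pointer while-loop with an independent per-cell binary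
-- search for the crossing split point (objective: alternative; the RETURN value is what is proved).

-- ===== PORT A =====

-- Shared subscript helpers (used by both ports): eggs[r][c] reads / writes.  In both programs every
-- index that is actually reached is in range, so the defaults of pyGetD/pySetD are never used.
def pvGet2 (t : List (List Int)) (r c : Int) : Int :=
  PySem.List.pyGetD (PySem.List.pyGetD t r []) c 0

def pvSet2 (t : List (List Int)) (r c v : Int) : List (List Int) :=
  PySem.List.pySetD t r (PySem.List.pySetD (PySem.List.pyGetD t r []) c v)

-- Exact model of Python's float comparison `j < math.log(i + 1, 2)` (both programs evaluate it on
-- 1 ≤ i ≤ 2^31, 0 ≤ j): it equals the exact predicate 2^j < i+1 except at i+1 ∈ {2^29, 2^31},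
-- where the float64 log rounds up (verified exhaustively at all powers-of-two neighbourhoods and
-- by random sampling over the whole Dom range).
def pvLogLt (j i : Int) : Bool :=
  decide (2 ^ j.toNat < i + 1) || (decide (i + 1 = 536870912) && decide (j = 29))
    || (decide (i + 1 = 2147483648) && decide (j = 31))

-- the first double loop of A (writes the 0 / 1 / 9999 base cells; i == 0 row is written with 0s)
def pvInitStepA (i : Int) (st : List (List Int) × List (List Int)) (j : Int) :
    List (List Int) × List (List Int) :=
  if i == 0 then (pvSet2 st.1 i j 0, pvSet2 st.2 i j 0)
  else if j ≥ i then (pvSet2 st.1 i j 1, pvSet2 st.2 i j 1)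
  else if pvLogLt j i then (pvSet2 st.1 i j 9999, pvSet2 st.2 i j 9999)
  else st

def pvInitA (n d : Int) : List (List Int) × List (List Int) :=
  (PySem.List.pyRange 0 (n+1) 1).foldl
    (fun st i => (PySem.List.pyRange 0 (d+1) 1).foldl (pvInitStepA i) st)
    ((PySem.List.pyRange 0 (n+1) 1).map (fun _ => List.replicate (d+1).toNat 0),
     (PySem.List.pyRange 0 (n+1) 1).map (fun _ => (PySem.List.pyRange 0 (d+1) 1).map (fun _ => (0:Int))))

-- A's while-loop (carried split pointer i).  fuel is only a totality device: each iteration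
-- increments n1 or i, i ≤ n1 ≤ n throughout, so 2*n+4 steps always suffice and the fuel-0 branch
-- is never reached.
def pvWhileA (n d1 : Int) : Nat → Int → Int → List (List Int) × List (List Int) →
    List (List Int) × List (List Int)
  | 0, _, _, st => st
  | fuel+1, n1, i, st =>
    if n1 ≤ n then
      if pvGet2 st.1 (n1 - i) (d1 - 1) ≤ 1 + pvGet2 st.1 (i - 1) (d1 - 1) then
        let val1 := max (1 + pvGet2 st.1 (i - 1) (d1 - 1)) (pvGet2 st.1 (n1 - i) (d1 - 1))
        let st1 := (pvSet2 st.1 n1 d1 val1, pvSet2 st.2 n1 d1 i)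
        let st2 :=
          if i ≥ 2 then
            let val2 := max (1 + pvGet2 st1.1 (i - 2) (d1 - 1)) (pvGet2 st1.1 (n1 - i + 1) (d1 - 1))
            if val2 < val1 then (pvSet2 st1.1 n1 d1 val2, pvSet2 st1.2 n1 d1 (i - 1)) else st1
          else st1
        pvWhileA n d1 fuel (n1 + 1) i st2
      else pvWhileA n d1 fuel n1 (i + 1) st
    else st

def minEggsAlgo3 (n : Int) (d : Int) : List (List Int) × List (List Int) :=
  (PySem.List.pyRange 2 (d+1) 1).foldl (fun st d1 => pvWhileA n d1 (2*n+4).toNat 2 1 st)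
    (pvInitA n d)

-- ===== PORT B =====

-- the first double loop of B (identical base table; row 0 is left as the zeros it already holds)
def pvInitStepB (i : Int) (st : List (List Int) × List (List Int)) (j : Int) :
    List (List Int) × List (List Int) :=
  if i == 0 then st
  else if j ≥ i then (pvSet2 st.1 i j 1, pvSet2 st.2 i j 1)
  else if pvLogLt j i then (pvSet2 st.1 i j 9999, pvSet2 st.2 i j 9999)
  else st

def pvInitB (n d : Int) : List (List Int) × List (List Int) :=
  (PySem.List.pyRange 0 (n+1) 1).foldl
    (fun st i => (PySem.List.pyRange 0 (d+1) 1).foldl (pvInitStepB i) st)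
    ((PySem.List.pyRange 0 (n+1) 1).map (fun _ => List.replicate (d+1).toNat 0),
     (PySem.List.pyRange 0 (n+1) 1).map (fun _ => List.replicate (d+1).toNat 0))

-- col = [row[d1 - 1] for row in eggs]
def pvColOf (eggs : List (List Int)) (d1 : Int) : List Int :=
  eggs.map (fun row => PySem.List.pyGetD row (d1 - 1) 0)

-- the `while lo < hi` binary search for the crossing split point.  fuel is only a totality
-- device: hi - lo strictly shrinks every iteration, so (n1+1).toNat steps always suffice and
-- the fuel-0 branch is never reached.
def pvBisect (col : List Int) (n1 : Int) : Nat → Int → Int → Int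
  | 0, lo, _ => lo
  | fuel+1, lo, hi =>
    if lo < hi then
      if PySem.List.pyGetD col (n1 - PySem.Int.floordiv (lo + hi) 2) 0
          ≤ 1 + PySem.List.pyGetD col (PySem.Int.floordiv (lo + hi) 2 - 1) 0 then
        pvBisect col n1 fuel lo (PySem.Int.floordiv (lo + hi) 2)
      else pvBisect col n1 fuel (PySem.Int.floordiv (lo + hi) 2 + 1) hi
    else lo

-- i = the binary search's lo after the loop
def pvScanI (col : List Int) (n1 : Int) : Int := pvBisect col n1 (n1+1).toNat 1 n1

-- the (value, floor) written into row n1 of column d1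
def pvCellB (col : List Int) (n1 : Int) : Int × Int :=
  let i := pvScanI col n1
  if 2 ≤ i ∧ PySem.List.pyGetD col (n1 - i + 1) 0 < 1 + PySem.List.pyGetD col (i - 1) 0 then
    (PySem.List.pyGetD col (n1 - i + 1) 0, i - 1)
  else (1 + PySem.List.pyGetD col (i - 1) 0, i)

def pvColStepB (col : List Int) (d1 : Int) (st : List (List Int) × List (List Int)) (n1 : Int) :
    List (List Int) × List (List Int) :=
  (pvSet2 st.1 n1 d1 (pvCellB col n1).1, pvSet2 st.2 n1 d1 (pvCellB col n1).2)

def minEggsAlgo3_alt (n : Int) (d : Int) : List (List Int) × List (List Int) :=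
  (PySem.List.pyRange 2 (d+1) 1).foldl
    (fun st d1 => (PySem.List.pyRange 2 (n+1) 1).foldl (pvColStepB (pvColOf st.1 d1) d1) st)
    (pvInitB n d)

-- ===== PRECONDITION & SPEC =====
def Spec_minEggsAlgo3 (n : Int) (d : Int) (out : List (List Int) × List (List Int)) : Prop := out = minEggsAlgo3_alt n d
instance (n : Int) (d : Int) (out : List (List Int) × List (List Int)) : Decidable (Spec_minEggsAlgo3 n d out) := by unfold Spec_minEggsAlgo3; infer_instance

-- ===== CLAIM (what is proved, stated in full; the proofs are below) =====
def Claim_equal_minEggsAlgo3 : Prop := ∀ (n : Int) (d : Int), Dom_minEggsAlgo3 n d → Spec_minEggsAlgo3 n d (minEggsAlgo3 n d)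

-- ===== LEMMAS AND PROOFS =====

-- Nat-indexed views of the cell read / write, and the table shape
def pvCellN (t : List (List Int)) (r c : Nat) : Int := (t.getD r []).getD c 0
def pvSetN (t : List (List Int)) (r c : Nat) (v : Int) : List (List Int) :=
  t.set r ((t.getD r []).set c v)
def pvShape (t : List (List Int)) (nr nc : Nat) : Prop :=
  t.length = nr ∧ ∀ row ∈ t, row.length = nc

-- the base table written by the initial double loop
def pvBase (r c : Nat) : Int :=
  if r = 0 then 0 else if (r:Int) ≤ (c:Int) then 1 else if pvLogLt (c:Int) (r:Int) then 9999 else 0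

theorem pvGet2_nonneg (t : List (List Int)) {r c : Int} (hr : 0 ≤ r) (hc : 0 ≤ c) :
    pvGet2 t r c = pvCellN t r.toNat c.toNat := by
  unfold pvGet2 pvCellN
  rw [PySem.List.pyGetD_of_nonneg t [] hr, PySem.List.pyGetD_of_nonneg _ 0 hc]

theorem pvSet2_nonneg (t : List (List Int)) {r c : Int} (v : Int) (hr : 0 ≤ r) (hc : 0 ≤ c) :
    pvSet2 t r c v = pvSetN t r.toNat c.toNat v := by
  unfold pvSet2 pvSetN
  rw [PySem.List.pyGetD_of_nonneg t [] hr, PySem.List.pySetD_of_nonneg _ v hc,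
    PySem.List.pySetD_of_nonneg _ _ hr]

theorem pvShape_setN {t : List (List Int)} {nr nc : Nat} (h : pvShape t nr nc) (r c : Nat) (v : Int) :
    pvShape (pvSetN t r c v) nr nc := by
  obtain ⟨hl, hrow⟩ := h
  by_cases hlt : r < t.length
  · refine ⟨by simp [pvSetN, hl], ?_⟩
    intro row hr2
    rcases List.mem_or_eq_of_mem_set hr2 with h2 | h2
    · exact hrow row h2
    · subst h2
      rw [List.length_set, List.getD_eq_getElem _ _ hlt]
      exact hrow _ (List.getElem_mem hlt)
  · have he : pvSetN t r c v = t := by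
      unfold pvSetN; exact List.set_eq_of_length_le (Nat.le_of_not_lt hlt)
    rw [he]; exact ⟨hl, hrow⟩

theorem pvGetD_set_self {α : Type} (l : List α) (i : Nat) (x d : α) (h : i < l.length) :
    (l.set i x).getD i d = x := by
  rw [List.getD_eq_getElem?_getD, List.getElem?_set_self h]; rfl

theorem pvGetD_set_ne {α : Type} (l : List α) {i j : Nat} (x : α) (d : α) (h : j ≠ i) :
    (l.set i x).getD j d = l.getD j d := by
  rw [List.getD_eq_getElem?_getD, List.getElem?_set_ne (Ne.symm h), ← List.getD_eq_getElem?_getD]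

theorem pvCellN_setN_self {t : List (List Int)} {r c : Nat} (v : Int)
    (hr : r < t.length) (hc : c < (t.getD r []).length) :
    pvCellN (pvSetN t r c v) r c = v := by
  unfold pvCellN pvSetN
  rw [pvGetD_set_self _ _ _ _ hr, pvGetD_set_self _ _ _ _ hc]

theorem pvCellN_setN_ne {t : List (List Int)} {r c r' c' : Nat} (v : Int)
    (h : r' ≠ r ∨ c' ≠ c) :
    pvCellN (pvSetN t r c v) r' c' = pvCellN t r' c' := by
  by_cases hrr : r' = r
  · subst hrr
    rcases h with h | h
    · exact absurd rfl h
    · by_cases hlt : r' < t.length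
      · unfold pvCellN pvSetN
        rw [pvGetD_set_self _ _ _ _ hlt, pvGetD_set_ne _ _ _ h]
      · unfold pvCellN pvSetN
        rw [List.set_eq_of_length_le (Nat.le_of_not_lt hlt)]
  · unfold pvCellN pvSetN
    rw [pvGetD_set_ne _ _ _ hrr]

theorem pvSetN_setN (t : List (List Int)) (r c : Nat) (v w : Int) :
    pvSetN (pvSetN t r c v) r c w = pvSetN t r c w := by
  by_cases hlt : r < t.length
  · unfold pvSetN
    rw [pvGetD_set_self _ _ _ _ hlt, List.set_set, List.set_set]
  · have he : pvSetN t r c v = t := by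
      unfold pvSetN; exact List.set_eq_of_length_le (Nat.le_of_not_lt hlt)
    rw [he]

theorem pvSet2_set2 (t : List (List Int)) {r c : Int} (hr : 0 ≤ r) (hc : 0 ≤ c) (v w : Int) :
    pvSet2 (pvSet2 t r c v) r c w = pvSet2 t r c w := by
  rw [pvSet2_nonneg t v hr hc, pvSet2_nonneg _ w hr hc, pvSet2_nonneg t w hr hc]
  exact pvSetN_setN t r.toNat c.toNat v w

theorem pvSetN_noop {t : List (List Int)} {r c : Nat} {v : Int} (h : pvCellN t r c = v) :
    pvSetN t r c v = t := by
  by_cases hlt : r < t.length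
  · by_cases hc : c < (t.getD r []).length
    · have h2 : (t.getD r []).set c v = t.getD r [] := by
        unfold pvCellN at h
        rw [← h, List.getD_eq_getElem _ _ hc]
        exact List.set_getElem_self hc
      unfold pvSetN
      rw [h2, List.getD_eq_getElem _ _ hlt]
      exact List.set_getElem_self hlt
    · unfold pvSetN
      rw [List.set_eq_of_length_le (Nat.le_of_not_lt hc), List.getD_eq_getElem _ _ hlt]
      exact List.set_getElem_self hlt
  · unfold pvSetN
    exact List.set_eq_of_length_le (Nat.le_of_not_lt hlt)

theorem pvRowLen {t : List (List Int)} {nr nc : Nat} (h : pvShape t nr nc) {r : Nat}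
    (hr : r < nr) : (t.getD r []).length = nc := by
  have hlt : r < t.length := by have := h.1; omega
  rw [List.getD_eq_getElem _ _ hlt]
  exact h.2 _ (List.getElem_mem hlt)

theorem pvCellN_oor {t : List (List Int)} {nr nc : Nat} (h : pvShape t nr nc) {r c : Nat}
    (hr : nr ≤ r) : pvCellN t r c = 0 := by
  unfold pvCellN
  have hl := h.1
  rw [List.getD_eq_default _ _ (by omega : t.length ≤ r)]
  simp

-- reading through the extracted column
theorem pyGetD_colOf (t : List (List Int)) (d1 r : Int) :
    PySem.List.pyGetD (pvColOf t d1) r 0 = pvGet2 t r (d1 - 1) := by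
  have he2 : PySem.List.pyGetD ([] : List Int) (d1 - 1) 0 = 0 := by
    simp [PySem.List.pyGetD, PySem.List.pyGet?, PySem.List.pyIdx?]
  have hm := PySem.List.pyGetD_map (fun row => PySem.List.pyGetD row (d1 - 1) 0) t r []
  simp only [he2] at hm
  unfold pvColOf pvGet2
  exact hm

theorem colOf_getD (t : List (List Int)) {d1 : Int} (hd1 : 1 ≤ d1) (r : Nat) :
    (pvColOf t d1).getD r 0 = pvCellN t r (d1 - 1).toNat := by
  have h1 := PySem.List.pyGetD_natCast (pvColOf t d1) r 0
  rw [← h1, pyGetD_colOf, pvGet2_nonneg t (by positivity) (by omega)]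
  simp

theorem colOf_length (t : List (List Int)) (d1 : Int) : (pvColOf t d1).length = t.length := by
  simp [pvColOf]

theorem colOf_setN (t : List (List Int)) {d1 : Int} (r c : Nat) (v : Int)
    (hd1 : 1 ≤ d1) (hc : (c:Int) ≠ d1 - 1) :
    pvColOf (pvSetN t r c v) d1 = pvColOf t d1 := by
  by_cases hlt : r < t.length
  · unfold pvColOf pvSetN
    rw [List.map_set]
    have h2 : PySem.List.pyGetD ((t.getD r []).set c v) (d1 - 1) 0
        = PySem.List.pyGetD (t.getD r []) (d1 - 1) 0 := by
      rw [PySem.List.pyGetD_of_nonneg _ 0 (by omega : (0:Int) ≤ d1 - 1),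
        PySem.List.pyGetD_of_nonneg _ 0 (by omega : (0:Int) ≤ d1 - 1)]
      exact pvGetD_set_ne _ _ _ (by omega : (d1-1).toNat ≠ c)
    rw [h2]
    have h3 : PySem.List.pyGetD (t.getD r []) (d1 - 1) 0
        = (t.map (fun row => PySem.List.pyGetD row (d1 - 1) 0))[r]'(by simpa using hlt) := by
      rw [List.getD_eq_getElem _ _ hlt]; simp
    rw [h3]
    exact List.set_getElem_self _
  · unfold pvColOf pvSetN
    rw [List.set_eq_of_length_le (Nat.le_of_not_lt hlt)]

-- ----- the initial double loops -----

theorem pvSetN_oor {t : List (List Int)} {r : Nat} (c : Nat) (v : Int) (h : t.length ≤ r) :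
    pvSetN t r c v = t := by
  unfold pvSetN; exact List.set_eq_of_length_le h

theorem pvFoldl_fixed {α β : Type} {f : α → β → α} {st : α} :
    ∀ {l : List β}, (∀ x ∈ l, f st x = st) → l.foldl f st = st
  | [], _ => rfl
  | x :: xs, h => by
    rw [List.foldl_cons, h x (by simp)]
    exact pvFoldl_fixed (fun y hy => h y (by simp [hy]))

def pvT0 (n d : Int) : List (List Int) :=
  (PySem.List.pyRange 0 (n+1) 1).map (fun _ => List.replicate (d+1).toNat 0)

theorem pvT0_cell (n d : Int) (r c : Nat) : pvCellN (pvT0 n d) r c = 0 := by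
  unfold pvCellN pvT0
  by_cases hr : r < ((PySem.List.pyRange 0 (n+1) 1).map
      (fun _ => List.replicate (d+1).toNat (0:Int))).length
  · rw [List.getD_eq_getElem _ _ hr]
    simp only [List.getElem_map]
    by_cases hc : c < (d+1).toNat
    · rw [List.getD_eq_getElem _ _ (by simpa using hc)]
      simp
    · rw [List.getD_eq_default _ _ (by simpa using Nat.le_of_not_lt hc)]
  · rw [List.getD_eq_default _ _ (Nat.le_of_not_lt hr)]
    simp

theorem pvT0_shape (n d : Int) : pvShape (pvT0 n d) (n+1).toNat (d+1).toNat := by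
  constructor
  · simp [pvT0, PySem.List.length_pyRange_one]
  · intro row hrow
    simp only [pvT0, List.mem_map] at hrow
    obtain ⟨_, _, hr⟩ := hrow
    simp [← hr]

theorem pvInitStepB_zero (st : List (List Int) × List (List Int)) (j : Int) :
    pvInitStepB 0 st j = st := by
  simp [pvInitStepB]

theorem pvInitStep_eq {i : Int} (hi : i ≠ 0) (st : List (List Int) × List (List Int)) (j : Int) :
    pvInitStepA i st j = pvInitStepB i st j := by
  simp [pvInitStepA, pvInitStepB, hi]

theorem init_eq (n d : Int) : pvInitA n d = pvInitB n d := by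
  have hsec : ((PySem.List.pyRange 0 (d+1) 1).map (fun _ => (0:Int)))
      = List.replicate (d+1).toNat 0 := by
    rw [List.map_const', PySem.List.length_pyRange_one]
    norm_num
  unfold pvInitA pvInitB
  rw [hsec]
  show (PySem.List.pyRange 0 (n+1) 1).foldl
      (fun st i => (PySem.List.pyRange 0 (d+1) 1).foldl (pvInitStepA i) st) (pvT0 n d, pvT0 n d)
    = (PySem.List.pyRange 0 (n+1) 1).foldl
      (fun st i => (PySem.List.pyRange 0 (d+1) 1).foldl (pvInitStepB i) st) (pvT0 n d, pvT0 n d)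
  by_cases hn : n + 1 ≤ 0
  · rw [PySem.List.pyRange_one_eq_nil hn]
    rfl
  · have hn' : (0:Int) < n + 1 := by omega
    rw [PySem.List.pyRange_one_cons hn', List.foldl_cons, List.foldl_cons]
    have hA0 : (PySem.List.pyRange 0 (d+1) 1).foldl (pvInitStepA 0) (pvT0 n d, pvT0 n d)
        = (pvT0 n d, pvT0 n d) := by
      apply pvFoldl_fixed
      intro j hj
      have hj0 : 0 ≤ j := (PySem.List.mem_pyRange_one.1 hj).1
      have hset : pvSet2 (pvT0 n d) 0 j 0 = pvT0 n d := by
        rw [pvSet2_nonneg _ _ le_rfl hj0]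
        exact pvSetN_noop (pvT0_cell n d 0 j.toNat)
      simp only [pvInitStepA, BEq.rfl, if_true]
      show (pvSet2 (pvT0 n d) 0 j 0, pvSet2 (pvT0 n d) 0 j 0) = (pvT0 n d, pvT0 n d)
      rw [hset]
    have hB0 : (PySem.List.pyRange 0 (d+1) 1).foldl (pvInitStepB 0) (pvT0 n d, pvT0 n d)
        = (pvT0 n d, pvT0 n d) :=
      pvFoldl_fixed (fun j _ => pvInitStepB_zero _ j)
    rw [hA0, hB0]
    apply PySem.List.foldl_congr_mem
    intro acc i hi
    have hi1 : 1 ≤ i := (PySem.List.mem_pyRange_one.1 hi).1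
    exact List.foldl_ext _ _ acc (fun st j _ => pvInitStep_eq (by omega) st j)

theorem initB_inner (n d : Int) (i : Int) (hi : 1 ≤ i) :
    ∀ (k : Nat) (a : Int) (st : List (List Int) × List (List Int)),
      k = (d + 1 - a).toNat → 0 ≤ a →
      pvShape st.1 (n+1).toNat (d+1).toNat → pvShape st.2 (n+1).toNat (d+1).toNat →
      st.2 = st.1 →
      (∀ c : Nat, a ≤ (c:Int) → pvCellN st.1 i.toNat c = 0) →
      pvShape ((PySem.List.pyRange a (d+1) 1).foldl (pvInitStepB i) st).1 (n+1).toNat (d+1).toNat ∧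
      pvShape ((PySem.List.pyRange a (d+1) 1).foldl (pvInitStepB i) st).2 (n+1).toNat (d+1).toNat ∧
      ((PySem.List.pyRange a (d+1) 1).foldl (pvInitStepB i) st).2
        = ((PySem.List.pyRange a (d+1) 1).foldl (pvInitStepB i) st).1 ∧
      ∀ r c : Nat, pvCellN ((PySem.List.pyRange a (d+1) 1).foldl (pvInitStepB i) st).1 r c =
        if r = i.toNat ∧ a ≤ (c:Int) ∧ (c:Int) < d + 1 ∧ (r:Int) < n + 1 then pvBase r c
        else pvCellN st.1 r c := by
  intro k
  induction k with
  | zero =>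
    intro a st hk ha hs1 hs2 hdiag h0
    have hnil : PySem.List.pyRange a (d+1) 1 = [] :=
      PySem.List.pyRange_one_eq_nil (by omega)
    rw [hnil]
    simp only [List.foldl_nil]
    exact ⟨hs1, hs2, hdiag, fun r c => by rw [if_neg (by omega)]⟩
  | succ k ih =>
    intro a st hk ha hs1 hs2 hdiag h0
    have hlt : a < d + 1 := by omega
    rw [PySem.List.pyRange_one_cons hlt, List.foldl_cons]
    -- the single step at column a
    have hbeq : (i == 0) = false := by simp; omega
    have hicast : ((i.toNat : Int)) = i := by omega
    have hacast : ((a.toNat : Int)) = a := by omega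
    -- characterize the step
    have hstep : ∃ st' : List (List Int) × List (List Int),
        pvInitStepB i st a = st' ∧
        pvShape st'.1 (n+1).toNat (d+1).toNat ∧ pvShape st'.2 (n+1).toNat (d+1).toNat ∧
        st'.2 = st'.1 ∧
        (∀ r c : Nat, pvCellN st'.1 r c =
          if r = i.toNat ∧ c = a.toNat ∧ (r:Int) < n + 1 then pvBase r c
          else pvCellN st.1 r c) := by
      refine ⟨pvInitStepB i st a, rfl, ?_⟩
      unfold pvInitStepB
      rw [hbeq]
      simp only [Bool.false_eq_true, if_false]
      have hwrite : ∀ v : Int,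
          (∀ r c : Nat, (r = i.toNat ∧ c = a.toNat ∧ (r:Int) < n + 1) → pvBase r c = v) →
          pvShape (pvSet2 st.1 i a v) (n+1).toNat (d+1).toNat ∧
          pvShape (pvSet2 st.2 i a v) (n+1).toNat (d+1).toNat ∧
          pvSet2 st.2 i a v = pvSet2 st.1 i a v ∧
          (∀ r c : Nat, pvCellN (pvSet2 st.1 i a v) r c =
            if r = i.toNat ∧ c = a.toNat ∧ (r:Int) < n + 1 then pvBase r c
            else pvCellN st.1 r c) := by
        intro v hv
        rw [pvSet2_nonneg _ _ (by omega) (by omega), pvSet2_nonneg _ _ (by omega) (by omega),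
          hdiag]
        refine ⟨pvShape_setN hs1 _ _ _, pvShape_setN hs1 _ _ _, rfl, fun r c => ?_⟩
        have hlen := hs1.1
        by_cases hcond : r = i.toNat ∧ c = a.toNat ∧ (r:Int) < n + 1
        · rw [if_pos hcond, hv r c hcond]
          obtain ⟨hr, hc, hrn⟩ := hcond
          rw [hr, hc]
          exact pvCellN_setN_self v (by omega)
            (by rw [pvRowLen hs1 (by omega : i.toNat < (n+1).toNat)]; omega)
        · rw [if_neg hcond]
          by_cases hrc : r = i.toNat ∧ c = a.toNat
          · obtain ⟨hr, hc⟩ := hrc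
            have hge : n + 1 ≤ (r:Int) := by
              by_contra hx
              exact hcond ⟨hr, hc, by omega⟩
            rw [pvSetN_oor _ _ (by omega)]
          · exact pvCellN_setN_ne v (not_and_or.mp hrc)
      by_cases hge : a ≥ i
      · rw [if_pos hge]
        refine hwrite 1 ?_
        intro r c ⟨hr, hc, hrn⟩
        unfold pvBase
        rw [if_neg (by omega), if_pos (by omega)]
      · rw [if_neg hge]
        by_cases hlog : pvLogLt a i
        · rw [if_pos hlog]
          refine hwrite 9999 ?_
          intro r c ⟨hr, hc, hrn⟩
          unfold pvBase
          rw [if_neg (by omega), if_neg (by omega)]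
          subst hr; subst hc
          rw [hacast, hicast, if_pos hlog]
        · rw [if_neg hlog]
          refine ⟨hs1, hs2, hdiag, fun r c => ?_⟩
          by_cases hcond : r = i.toNat ∧ c = a.toNat ∧ (r:Int) < n + 1
          · rw [if_pos hcond]
            obtain ⟨hr, hc, _⟩ := hcond
            unfold pvBase
            rw [if_neg (by omega), if_neg (by omega)]
            subst hr; subst hc
            rw [hacast, hicast, if_neg (by simpa using hlog)]
            rw [h0 a.toNat (by omega)]
          · rw [if_neg hcond]
    obtain ⟨st', hst', hs1', hs2', hdiag', hcell'⟩ := hstep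
    rw [hst']
    have hres := ih (a+1) st' (by omega) (by omega) hs1' hs2' hdiag'
      (fun c hc => by
        rw [hcell' i.toNat c, if_neg (by omega)]
        exact h0 c (by omega))
    obtain ⟨hr1, hr2, hrdiag, hrcell⟩ := hres
    refine ⟨hr1, hr2, hrdiag, fun r c => ?_⟩
    rw [hrcell r c]
    by_cases hc1 : r = i.toNat ∧ a + 1 ≤ (c:Int) ∧ (c:Int) < d + 1 ∧ (r:Int) < n + 1
    · rw [if_pos hc1, if_pos (by omega)]
    · rw [if_neg hc1, hcell' r c]
      by_cases hc2 : r = i.toNat ∧ c = a.toNat ∧ (r:Int) < n + 1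
      · rw [if_pos hc2, if_pos (by omega)]
      · rw [if_neg hc2, if_neg (by omega)]

theorem initB_outer (n d : Int) :
    ∀ (k : Nat) (a : Int) (st : List (List Int) × List (List Int)),
      k = (n + 1 - a).toNat → 1 ≤ a →
      pvShape st.1 (n+1).toNat (d+1).toNat → pvShape st.2 (n+1).toNat (d+1).toNat →
      st.2 = st.1 →
      (∀ r c : Nat, a ≤ (r:Int) → pvCellN st.1 r c = 0) →
      pvShape ((PySem.List.pyRange a (n+1) 1).foldl
        (fun st i => (PySem.List.pyRange 0 (d+1) 1).foldl (pvInitStepB i) st) st).1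
        (n+1).toNat (d+1).toNat ∧
      pvShape ((PySem.List.pyRange a (n+1) 1).foldl
        (fun st i => (PySem.List.pyRange 0 (d+1) 1).foldl (pvInitStepB i) st) st).2
        (n+1).toNat (d+1).toNat ∧
      ((PySem.List.pyRange a (n+1) 1).foldl
        (fun st i => (PySem.List.pyRange 0 (d+1) 1).foldl (pvInitStepB i) st) st).2
        = ((PySem.List.pyRange a (n+1) 1).foldl
        (fun st i => (PySem.List.pyRange 0 (d+1) 1).foldl (pvInitStepB i) st) st).1 ∧
      ∀ r c : Nat, pvCellN ((PySem.List.pyRange a (n+1) 1).foldl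
        (fun st i => (PySem.List.pyRange 0 (d+1) 1).foldl (pvInitStepB i) st) st).1 r c =
        if a ≤ (r:Int) ∧ (r:Int) < n + 1 ∧ (c:Int) < d + 1 then pvBase r c
        else pvCellN st.1 r c := by
  intro k
  induction k with
  | zero =>
    intro a st hk ha hs1 hs2 hdiag h0
    rw [show PySem.List.pyRange a (n+1) 1 = [] from PySem.List.pyRange_one_eq_nil (by omega)]
    simp only [List.foldl_nil]
    exact ⟨hs1, hs2, hdiag, fun r c => by rw [if_neg (by omega)]⟩
  | succ k ih =>
    intro a st hk ha hs1 hs2 hdiag h0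
    have hlt : a < n + 1 := by omega
    rw [PySem.List.pyRange_one_cons hlt, List.foldl_cons]
    have hacast : ((a.toNat : Int)) = a := by omega
    have hrow := initB_inner n d a (by omega) (d+1-0).toNat 0 st (by omega) le_rfl
      hs1 hs2 hdiag (fun c _ => h0 a.toNat c (by omega))
    obtain ⟨hs1', hs2', hdiag', hcell'⟩ := hrow
    have hres := ih (a+1)
      ((PySem.List.pyRange 0 (d+1) 1).foldl (pvInitStepB a) st) (by omega) (by omega)
      hs1' hs2' hdiag'
      (fun r c hr => by
        rw [hcell' r c, if_neg (by omega)]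
        exact h0 r c (by omega))
    obtain ⟨hr1, hr2, hrdiag, hrcell⟩ := hres
    refine ⟨hr1, hr2, hrdiag, fun r c => ?_⟩
    rw [hrcell r c]
    by_cases hc1 : a + 1 ≤ (r:Int) ∧ (r:Int) < n + 1 ∧ (c:Int) < d + 1
    · rw [if_pos hc1, if_pos (by omega)]
    · rw [if_neg hc1, hcell' r c]
      by_cases hc2 : r = a.toNat ∧ 0 ≤ (c:Int) ∧ (c:Int) < d + 1 ∧ (r:Int) < n + 1
      · rw [if_pos hc2, if_pos (by omega)]
      · rw [if_neg hc2, if_neg (by omega)]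

theorem initB_char (n d : Int) :
    pvShape (pvInitB n d).1 (n+1).toNat (d+1).toNat ∧ (pvInitB n d).2 = (pvInitB n d).1 ∧
    ∀ r c : Nat, pvCellN (pvInitB n d).1 r c =
      if r < (n+1).toNat ∧ c < (d+1).toNat then pvBase r c else 0 := by
  have h := initB_outer n d ((n+1) - 1).toNat 1 (pvT0 n d, pvT0 n d) rfl le_rfl
    (pvT0_shape n d) (pvT0_shape n d) rfl (fun r c _ => pvT0_cell n d r c)
  by_cases hn : n + 1 ≤ 0
  · have hstart : pvInitB n d = (pvT0 n d, pvT0 n d) := by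
      unfold pvInitB
      show (PySem.List.pyRange 0 (n+1) 1).foldl
          (fun st i => (PySem.List.pyRange 0 (d+1) 1).foldl (pvInitStepB i) st)
          (pvT0 n d, pvT0 n d) = _
      rw [show PySem.List.pyRange 0 (n+1) 1 = [] from PySem.List.pyRange_one_eq_nil hn]
      rfl
    rw [hstart]
    exact ⟨pvT0_shape n d, rfl, fun r c => by rw [pvT0_cell, if_neg (by omega)]⟩
  · have hn' : (0:Int) < n + 1 := by omega
    have hfold : pvInitB n d = (PySem.List.pyRange 1 (n+1) 1).foldl
        (fun st i => (PySem.List.pyRange 0 (d+1) 1).foldl (pvInitStepB i) st)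
        (pvT0 n d, pvT0 n d) := by
      unfold pvInitB
      show (PySem.List.pyRange 0 (n+1) 1).foldl
          (fun st i => (PySem.List.pyRange 0 (d+1) 1).foldl (pvInitStepB i) st)
          (pvT0 n d, pvT0 n d) = _
      rw [PySem.List.pyRange_one_cons hn', List.foldl_cons]
      rw [pvFoldl_fixed (fun j _ => pvInitStepB_zero _ j)]
      norm_num
    rw [hfold]
    obtain ⟨hs1, hs2, hdiag, hcell⟩ := h
    refine ⟨hs1, hdiag, fun r c => ?_⟩
    rw [hcell r c, pvT0_cell]
    by_cases h0 : r = 0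
    · subst h0
      rw [if_neg (by omega)]
      by_cases hc : (0:Nat) < (n+1).toNat ∧ c < (d+1).toNat
      · rw [if_pos hc]; rfl
      · rw [if_neg hc]
    · have hcast : ((r:Int) < n + 1 ↔ r < (n+1).toNat) := by omega
      have hcast2 : ((c:Int) < d + 1 ↔ c < (d+1).toNat) := by omega
      by_cases hc : 1 ≤ (r:Int) ∧ (r:Int) < n + 1 ∧ (c:Int) < d + 1
      · rw [if_pos hc, if_pos (by omega)]
      · rw [if_neg hc, if_neg (by omega)]

-- ----- the DP loops -----

-- the generator / while-loop comparison on a fixed column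
def pvCond (col : List Int) (n1 k : Int) : Prop :=
  PySem.List.pyGetD col (n1 - k) 0 ≤ 1 + PySem.List.pyGetD col (k - 1) 0

-- a usable column: right length, entries nonnegative and nondecreasing
def pvColGood (col : List Int) (n : Int) : Prop :=
  col.length = (n+1).toNat ∧
  (∀ x : Int, 0 ≤ x → 0 ≤ PySem.List.pyGetD col x 0) ∧
  (∀ x y : Int, 0 ≤ x → x ≤ y → y ≤ n → PySem.List.pyGetD col x 0 ≤ PySem.List.pyGetD col y 0)

theorem pvCond_self {col : List Int} {n n1 : Int} (hg : pvColGood col n)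
    (h2 : 2 ≤ n1) (hn : n1 ≤ n) : pvCond col n1 n1 := by
  unfold pvCond
  rw [sub_self]
  have := hg.2.2 0 (n1 - 1) le_rfl (by omega) (by omega)
  omega

theorem pvCond_transfer {col : List Int} {n n1 k : Int} (hg : pvColGood col n)
    (hk : 1 ≤ k) (hkn : k < n1) (hn : n1 ≤ n) (hnc : ¬ pvCond col n1 k) :
    ¬ pvCond col (n1 + 1) k := by
  unfold pvCond at *
  have := hg.2.2 (n1 - k) (n1 + 1 - k) (by omega) (by omega) (by omega)
  omega

theorem pvCond_mono {col : List Int} {n n1 k m : Int} (hg : pvColGood col n)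
    (hk : 1 ≤ k) (hkm : k ≤ m) (hm : m ≤ n1) (hn : n1 ≤ n)
    (hck : pvCond col n1 k) : pvCond col n1 m := by
  unfold pvCond at *
  have h1 := hg.2.2 (n1 - m) (n1 - k) (by omega) (by omega) (by omega)
  have h2 := hg.2.2 (k - 1) (m - 1) (by omega) (by omega) (by omega)
  omega

theorem pvBisect_correct {col : List Int} {n n1 : Int} (hg : pvColGood col n)
    (h2 : 2 ≤ n1) (hn : n1 ≤ n) :
    ∀ (fuel : Nat) (lo hi : Int), 1 ≤ lo → lo ≤ hi → hi ≤ n1 →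
      pvCond col n1 hi → (∀ k : Int, 1 ≤ k → k < lo → ¬ pvCond col n1 k) →
      (hi - lo).toNat < fuel →
      1 ≤ pvBisect col n1 fuel lo hi ∧ pvBisect col n1 fuel lo hi ≤ n1 ∧
        pvCond col n1 (pvBisect col n1 fuel lo hi) ∧
        ∀ k : Int, 1 ≤ k → k < pvBisect col n1 fuel lo hi → ¬ pvCond col n1 k := by
  intro fuel
  induction fuel with
  | zero => intro lo hi _ _ _ _ _ hf; omega
  | succ fuel ih =>
    intro lo hi hlo hlh hhi hch hbelow hf
    by_cases hlt : lo < hi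
    · have hmid : PySem.Int.floordiv (lo + hi) 2 = (lo + hi) / 2 :=
        PySem.Int.floordiv_eq_ediv_of_pos (by norm_num)
      rw [pvBisect, if_pos hlt]
      by_cases hcm : PySem.List.pyGetD col (n1 - PySem.Int.floordiv (lo + hi) 2) 0
          ≤ 1 + PySem.List.pyGetD col (PySem.Int.floordiv (lo + hi) 2 - 1) 0
      · rw [if_pos hcm]
        exact ih lo (PySem.Int.floordiv (lo + hi) 2) hlo (by rw [hmid]; omega)
          (by rw [hmid]; omega) hcm hbelow (by rw [hmid]; omega)
      · rw [if_neg hcm]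
        refine ih (PySem.Int.floordiv (lo + hi) 2 + 1) hi (by rw [hmid]; omega)
          (by rw [hmid]; omega) hhi hch (fun k hk1 hk2 => ?_) (by rw [hmid]; omega)
        by_cases hklo : k < lo
        · exact hbelow k hk1 hklo
        · intro hck
          exact hcm (pvCond_mono hg hk1 (by rw [hmid] at hk2 ⊢; omega)
            (by rw [hmid]; omega) hn hck)
    · rw [pvBisect, if_neg hlt]
      have he : lo = hi := by omega
      exact ⟨hlo, by omega, he ▸ hch, fun k hk1 hk2 => hbelow k hk1 hk2⟩

theorem pvScan_spec {col : List Int} {n n1 : Int} (hg : pvColGood col n)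
    (h2 : 2 ≤ n1) (hn : n1 ≤ n) :
    1 ≤ pvScanI col n1 ∧ pvScanI col n1 ≤ n1 ∧ pvCond col n1 (pvScanI col n1) ∧
      ∀ k : Int, 1 ≤ k → k < pvScanI col n1 → ¬ pvCond col n1 k := by
  unfold pvScanI
  exact pvBisect_correct hg h2 hn (n1+1).toNat 1 n1 le_rfl (by omega) le_rfl
    (pvCond_self hg h2 hn) (fun k hk1 hk2 => by omega) (by omega)

theorem pvScan_eq {col : List Int} {n n1 i : Int} (hg : pvColGood col n)
    (h2 : 2 ≤ n1) (hn : n1 ≤ n) (hi1 : 1 ≤ i) (hin : i ≤ n1)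
    (hci : pvCond col n1 i) (hlt : ∀ k : Int, 1 ≤ k → k < i → ¬ pvCond col n1 k) :
    pvScanI col n1 = i := by
  obtain ⟨h1, h2', h3, h4⟩ := pvScan_spec hg h2 hn
  rcases lt_trichotomy (pvScanI col n1) i with h | h | h
  · exact absurd h3 (hlt _ h1 h)
  · exact h
  · exact absurd hci (h4 i hi1 h)

theorem pvScan_mono {col : List Int} {n n1 : Int} (hg : pvColGood col n)
    (h2 : 2 ≤ n1) (hn : n1 + 1 ≤ n) : pvScanI col n1 ≤ pvScanI col (n1 + 1) := by
  obtain ⟨ha1, ha2, ha3, ha4⟩ := pvScan_spec hg h2 (by omega)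
  obtain ⟨hb1, hb2, hb3, hb4⟩ := pvScan_spec hg (by omega : 2 ≤ n1 + 1) hn
  by_contra hc
  have hc2 : pvScanI col (n1+1) < pvScanI col n1 := by omega
  have h5 := ha4 (pvScanI col (n1+1)) hb1 hc2
  exact pvCond_transfer hg hb1 (by omega) (by omega) h5 hb3

theorem pvCell_ge_one {col : List Int} {n n1 : Int} (hg : pvColGood col n)
    (h2 : 2 ≤ n1) (hn : n1 ≤ n) : 1 ≤ (pvCellB col n1).1 := by
  obtain ⟨h1, h2', h3, h4⟩ := pvScan_spec hg h2 hn
  unfold pvCellB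
  by_cases hc : 2 ≤ pvScanI col n1 ∧
      PySem.List.pyGetD col (n1 - pvScanI col n1 + 1) 0
        < 1 + PySem.List.pyGetD col (pvScanI col n1 - 1) 0
  · rw [if_pos hc]
    have hnc := h4 (pvScanI col n1 - 1) (by omega) (by omega)
    unfold pvCond at hnc
    have hrw : n1 - (pvScanI col n1 - 1) = n1 - pvScanI col n1 + 1 := by ring
    rw [hrw] at hnc
    have := hg.2.1 (pvScanI col n1 - 1 - 1) (by omega)
    omega
  · rw [if_neg hc]
    have := hg.2.1 (pvScanI col n1 - 1) (by omega)
    omega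

theorem pvCell_mono {col : List Int} {n n1 : Int} (hg : pvColGood col n)
    (h2 : 2 ≤ n1) (hn : n1 + 1 ≤ n) : (pvCellB col n1).1 ≤ (pvCellB col (n1+1)).1 := by
  obtain ⟨ha1, ha2, ha3, ha4⟩ := pvScan_spec hg h2 (by omega)
  obtain ⟨hb1, hb2, hb3, hb4⟩ := pvScan_spec hg (by omega : 2 ≤ n1 + 1) hn
  have hmono := hg.2.2
  have hsm := pvScan_mono hg h2 hn
  simp only [pvCellB]
  set i := pvScanI col n1 with hidef
  set i' := pvScanI col (n1+1) with hi'def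
  have f1 : PySem.List.pyGetD col (i - 1) 0 ≤ PySem.List.pyGetD col (i' - 1) 0 :=
    hmono (i - 1) (i' - 1) (by omega) (by omega) (by omega)
  by_cases hA : 2 ≤ i ∧ PySem.List.pyGetD col (n1 - i + 1) 0
      < 1 + PySem.List.pyGetD col (i - 1) 0
  · by_cases hB : 2 ≤ i' ∧ PySem.List.pyGetD col (n1 + 1 - i' + 1) 0
        < 1 + PySem.List.pyGetD col (i' - 1) 0
    · rw [if_pos hB]
      rcases eq_or_lt_of_le hsm with he | hlt
      · -- same split point: the second candidate only moves right
        have f2 : PySem.List.pyGetD col (n1 - i + 1) 0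
            ≤ PySem.List.pyGetD col (n1 + 1 - i + 1) 0 :=
          hmono (n1 - i + 1) (n1 + 1 - i + 1) (by omega) (by omega) (by omega)
        rw [← he] at hB ⊢
        by_cases hA2 : 2 ≤ i ∧ PySem.List.pyGetD col (n1 - i + 1) 0
            < 1 + PySem.List.pyGetD col (i - 1) 0
        · rw [if_pos hA2]; simp only; omega
        · rw [if_neg hA2]
          simp only
          have : ¬ PySem.List.pyGetD col (n1 - i + 1) 0
              < 1 + PySem.List.pyGetD col (i - 1) 0 := by
            intro hx; exact hA2 ⟨hB.1, hx⟩
          omega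
      · -- the split point moved strictly right
        have hnc := hb4 (i' - 1) (by omega) (by omega)
        unfold pvCond at hnc
        rw [show n1 + 1 - (i' - 1) = n1 + 1 - i' + 1 from by ring] at hnc
        have f4 : PySem.List.pyGetD col (i - 1) 0 ≤ PySem.List.pyGetD col (i' - 1 - 1) 0 :=
          hmono (i - 1) (i' - 1 - 1) (by omega) (by omega) (by omega)
        by_cases hA2 : 2 ≤ i ∧ PySem.List.pyGetD col (n1 - i + 1) 0
            < 1 + PySem.List.pyGetD col (i - 1) 0
        · rw [if_pos hA2]; simp only; omega
        · rw [if_neg hA2]; simp only; omega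
    · rw [if_neg hB]
      by_cases hA2 : 2 ≤ i ∧ PySem.List.pyGetD col (n1 - i + 1) 0
          < 1 + PySem.List.pyGetD col (i - 1) 0
      · rw [if_pos hA2]; simp only; omega
      · rw [if_neg hA2]; simp only; omega
  · by_cases hB : 2 ≤ i' ∧ PySem.List.pyGetD col (n1 + 1 - i' + 1) 0
        < 1 + PySem.List.pyGetD col (i' - 1) 0
    · rw [if_pos hB]
      rcases eq_or_lt_of_le hsm with he | hlt
      · -- same split point: the second candidate only moves right
        have f2 : PySem.List.pyGetD col (n1 - i + 1) 0
            ≤ PySem.List.pyGetD col (n1 + 1 - i + 1) 0 :=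
          hmono (n1 - i + 1) (n1 + 1 - i + 1) (by omega) (by omega) (by omega)
        rw [← he] at hB ⊢
        by_cases hA2 : 2 ≤ i ∧ PySem.List.pyGetD col (n1 - i + 1) 0
            < 1 + PySem.List.pyGetD col (i - 1) 0
        · rw [if_pos hA2]; simp only; omega
        · rw [if_neg hA2]
          simp only
          have : ¬ PySem.List.pyGetD col (n1 - i + 1) 0
              < 1 + PySem.List.pyGetD col (i - 1) 0 := by
            intro hx; exact hA2 ⟨hB.1, hx⟩
          omega
      · -- the split point moved strictly right
        have hnc := hb4 (i' - 1) (by omega) (by omega)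
        unfold pvCond at hnc
        rw [show n1 + 1 - (i' - 1) = n1 + 1 - i' + 1 from by ring] at hnc
        have f4 : PySem.List.pyGetD col (i - 1) 0 ≤ PySem.List.pyGetD col (i' - 1 - 1) 0 :=
          hmono (i - 1) (i' - 1 - 1) (by omega) (by omega) (by omega)
        by_cases hA2 : 2 ≤ i ∧ PySem.List.pyGetD col (n1 - i + 1) 0
            < 1 + PySem.List.pyGetD col (i - 1) 0
        · rw [if_pos hA2]; simp only; omega
        · rw [if_neg hA2]; simp only; omega
    · rw [if_neg hB]
      by_cases hA2 : 2 ≤ i ∧ PySem.List.pyGetD col (n1 - i + 1) 0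
          < 1 + PySem.List.pyGetD col (i - 1) 0
      · rw [if_pos hA2]; simp only; omega
      · rw [if_neg hA2]; simp only; omega


-- the while loop of A equals the per-row scan fold of B on a fixed good column
theorem dp_inner (n d1 : Int) (col : List Int) (hd1 : 2 ≤ d1) (hg : pvColGood col n) :
    ∀ (fuel : Nat) (n1 i : Int) (st : List (List Int) × List (List Int)),
      2 ≤ n1 → n1 ≤ n + 1 → 1 ≤ i → i ≤ n1 →
      (∀ k : Int, 1 ≤ k → k < i → ¬ pvCond col n1 k) →
      pvColOf st.1 d1 = col →
      (2*n + 2 - n1 - i).toNat < fuel →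
      pvWhileA n d1 fuel n1 i st
        = (PySem.List.pyRange n1 (n+1) 1).foldl (pvColStepB col d1) st := by
  intro fuel
  induction fuel with
  | zero => intro n1 i st h2 hn1 hi1 hin hnc hcol hfuel; omega
  | succ fuel ih =>
    intro n1 i st h2 hn1 hi1 hin hnc hcol hfuel
    have hread : ∀ x : Int, pvGet2 st.1 x (d1 - 1) = PySem.List.pyGetD col x 0 := by
      intro x; rw [← hcol, pyGetD_colOf]
    have hcolset : ∀ v : Int, pvColOf (pvSet2 st.1 n1 d1 v) d1 = col := by
      intro v
      rw [pvSet2_nonneg _ _ (by omega) (by omega),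
        colOf_setN st.1 n1.toNat d1.toNat v (by omega) (by omega)]
      exact hcol
    have hread1 : ∀ v x : Int, pvGet2 (pvSet2 st.1 n1 d1 v) x (d1 - 1)
        = PySem.List.pyGetD col x 0 := by
      intro v x; rw [← hcolset v, pyGetD_colOf]
    by_cases hle : n1 ≤ n
    · by_cases hc : pvCond col n1 i
      · have hcp : pvGet2 st.1 (n1 - i) (d1 - 1) ≤ 1 + pvGet2 st.1 (i - 1) (d1 - 1) := by
          rw [hread, hread]; exact hc
        simp only [pvWhileA]
        rw [if_pos hle, if_pos hcp]
        rw [hread (n1 - i), hread (i - 1)]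
        rw [hread1 (max (1 + PySem.List.pyGetD col (i - 1) 0) (PySem.List.pyGetD col (n1 - i) 0))
            (i - 2),
          hread1 (max (1 + PySem.List.pyGetD col (i - 1) 0) (PySem.List.pyGetD col (n1 - i) 0))
            (n1 - i + 1)]
        rw [PySem.List.pyRange_one_cons (by omega : n1 < n + 1), List.foldl_cons]
        have htrans := ih (n1+1) i (pvColStepB col d1 st n1) (by omega) (by omega) hi1 (by omega)
          (fun k hk1 hk2 => pvCond_transfer hg hk1 (by omega) hle (hnc k hk1 hk2))
          (hcolset _) (by omega)
        rw [← htrans]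
        congr 1
        have hscan : pvScanI col n1 = i := pvScan_eq hg h2 hle hi1 hin hc hnc
        unfold pvColStepB pvCellB
        simp only [hscan]
        have hmax1 : max (1 + PySem.List.pyGetD col (i - 1) 0) (PySem.List.pyGetD col (n1 - i) 0)
            = 1 + PySem.List.pyGetD col (i - 1) 0 :=
          max_eq_left (by unfold pvCond at hc; omega)
        by_cases hi2 : i ≥ 2
        · have hnci := hnc (i-1) (by omega) (by omega)
          unfold pvCond at hnci
          rw [show n1 - (i - 1) = n1 - i + 1 from by ring,
            show i - 1 - 1 = i - 2 from by ring] at hnci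
          have hmax2 : max (1 + PySem.List.pyGetD col (i - 2) 0)
              (PySem.List.pyGetD col (n1 - i + 1) 0) = PySem.List.pyGetD col (n1 - i + 1) 0 :=
            max_eq_right (by omega)
          rw [if_pos hi2, hmax1, hmax2]
          by_cases hv : PySem.List.pyGetD col (n1 - i + 1) 0
              < 1 + PySem.List.pyGetD col (i - 1) 0
          · rw [if_pos hv, if_pos ⟨hi2, hv⟩]
            rw [pvSet2_set2 st.1 (by omega) (by omega), pvSet2_set2 st.2 (by omega) (by omega)]
          · rw [if_neg hv, if_neg (fun hx => hv hx.2)]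
        · rw [if_neg hi2, hmax1, if_neg (fun hx => hi2 hx.1)]
      · have hcp : ¬ (pvGet2 st.1 (n1 - i) (d1 - 1) ≤ 1 + pvGet2 st.1 (i - 1) (d1 - 1)) := by
          rw [hread, hread]; exact hc
        simp only [pvWhileA]
        rw [if_pos hle, if_neg hcp]
        have hne : i ≠ n1 := fun he => hc (by rw [he]; exact pvCond_self hg h2 hle)
        exact ih n1 (i+1) st h2 hn1 (by omega) (by omega)
          (fun k hk1 hk2 => by
            by_cases hki : k = i
            · exact hki ▸ hc
            · exact hnc k hk1 (by omega))
          hcol (by omega)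
    · simp only [pvWhileA]
      rw [if_neg hle,
        show PySem.List.pyRange n1 (n+1) 1 = [] from PySem.List.pyRange_one_eq_nil (by omega)]
      rfl

theorem whileA_triv (n d1 : Int) (hn : n < 2) (fuel : Nat)
    (st : List (List Int) × List (List Int)) : pvWhileA n d1 fuel 2 1 st = st := by
  cases fuel with
  | zero => rfl
  | succ fuel => rw [pvWhileA, if_neg (by omega)]

-- cells after B's column fold
theorem b_fold_char (n d1 : Int) (col : List Int) (hd1 : 2 ≤ d1) {d : Int}
    (hdr : d1 < d + 1) :
    ∀ (k : Nat) (a : Int) (st : List (List Int) × List (List Int)),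
      k = (n + 1 - a).toNat → 2 ≤ a →
      pvShape st.1 (n+1).toNat (d+1).toNat → pvShape st.2 (n+1).toNat (d+1).toNat →
      pvShape ((PySem.List.pyRange a (n+1) 1).foldl (pvColStepB col d1) st).1
        (n+1).toNat (d+1).toNat ∧
      pvShape ((PySem.List.pyRange a (n+1) 1).foldl (pvColStepB col d1) st).2
        (n+1).toNat (d+1).toNat ∧
      (∀ r c : Nat, pvCellN ((PySem.List.pyRange a (n+1) 1).foldl (pvColStepB col d1) st).1 r c =
        if (c:Int) = d1 ∧ a ≤ (r:Int) ∧ (r:Int) < n + 1 then (pvCellB col (r:Int)).1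
        else pvCellN st.1 r c) ∧
      (∀ r c : Nat, pvCellN ((PySem.List.pyRange a (n+1) 1).foldl (pvColStepB col d1) st).2 r c =
        if (c:Int) = d1 ∧ a ≤ (r:Int) ∧ (r:Int) < n + 1 then (pvCellB col (r:Int)).2
        else pvCellN st.2 r c) := by
  intro k
  induction k with
  | zero =>
    intro a st hk ha hs1 hs2
    rw [show PySem.List.pyRange a (n+1) 1 = [] from PySem.List.pyRange_one_eq_nil (by omega)]
    simp only [List.foldl_nil]
    exact ⟨hs1, hs2, fun r c => by rw [if_neg (by omega)], fun r c => by rw [if_neg (by omega)]⟩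
  | succ k ih =>
    intro a st hk ha hs1 hs2
    have hlt : a < n + 1 := by omega
    rw [PySem.List.pyRange_one_cons hlt, List.foldl_cons]
    have hset : ∀ (t : List (List Int)) (v : Int), pvShape t (n+1).toNat (d+1).toNat →
        pvShape (pvSet2 t a d1 v) (n+1).toNat (d+1).toNat ∧
        (∀ r c : Nat, pvCellN (pvSet2 t a d1 v) r c =
          if r = a.toNat ∧ c = d1.toNat then v else pvCellN t r c) := by
      intro t v hs
      rw [pvSet2_nonneg _ _ (by omega) (by omega)]
      refine ⟨pvShape_setN hs _ _ _, fun r c => ?_⟩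
      by_cases hrc : r = a.toNat ∧ c = d1.toNat
      · rw [if_pos hrc, hrc.1, hrc.2]
        have hlen := hs.1
        exact pvCellN_setN_self v (by omega)
          (by rw [pvRowLen hs (by omega : a.toNat < (n+1).toNat)]; omega)
      · rw [if_neg hrc]
        exact pvCellN_setN_ne v (not_and_or.mp hrc)
    obtain ⟨hs1', hc1'⟩ := hset st.1 (pvCellB col a).1 hs1
    obtain ⟨hs2', hc2'⟩ := hset st.2 (pvCellB col a).2 hs2
    obtain ⟨hr1, hr2, hrc1, hrc2⟩ := ih (a+1) (pvColStepB col d1 st a) (by omega) (by omega)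
      hs1' hs2'
    refine ⟨hr1, hr2, fun r c => ?_, fun r c => ?_⟩
    · rw [hrc1 r c]
      by_cases h1 : (c:Int) = d1 ∧ a + 1 ≤ (r:Int) ∧ (r:Int) < n + 1
      · rw [if_pos h1, if_pos (by omega)]
      · rw [if_neg h1]
        show pvCellN (pvSet2 st.1 a d1 (pvCellB col a).1) r c = _
        rw [hc1' r c]
        by_cases h2 : r = a.toNat ∧ c = d1.toNat
        · rw [if_pos h2, if_pos (by omega)]
          have : (r:Int) = a := by omega
          rw [this]
        · rw [if_neg h2, if_neg (by omega)]
    · rw [hrc2 r c]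
      by_cases h1 : (c:Int) = d1 ∧ a + 1 ≤ (r:Int) ∧ (r:Int) < n + 1
      · rw [if_pos h1, if_pos (by omega)]
      · rw [if_neg h1]
        show pvCellN (pvSet2 st.2 a d1 (pvCellB col a).2) r c = _
        rw [hc2' r c]
        by_cases h2 : r = a.toNat ∧ c = d1.toNat
        · rw [if_pos h2, if_pos (by omega)]
          have : (r:Int) = a := by omega
          rw [this]
        · rw [if_neg h2, if_neg (by omega)]

theorem mono_chain (g : Nat → Int) (n : Int)
    (h : ∀ r : Nat, (r:Int) + 1 ≤ n → g r ≤ g (r+1)) :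
    ∀ (k : Nat) (x y : Int), k = (y - x).toNat → 0 ≤ x → x ≤ y → y ≤ n →
      g x.toNat ≤ g y.toNat := by
  intro k
  induction k with
  | zero => intro x y hk _ _ _; have : x = y := by omega
            rw [this]
  | succ k ih =>
    intro x y hk hx hxy hyn
    have h1 : g x.toNat ≤ g (y-1).toNat := ih x (y-1) (by omega) hx (by omega) (by omega)
    have h2 : g (y-1).toNat ≤ g ((y-1).toNat + 1) := h (y-1).toNat (by omega)
    have : (y-1).toNat + 1 = y.toNat := by omega
    rw [this] at h2
    omega

-- the outer loop over the columns
theorem outer_eq (n d : Int) :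
    ∀ (k : Nat) (d1 : Int) (st : List (List Int) × List (List Int)),
      k = (d + 1 - d1).toNat → 2 ≤ d1 →
      pvShape st.1 (n+1).toNat (d+1).toNat → pvShape st.2 (n+1).toNat (d+1).toNat →
      (∀ c : Nat, pvCellN st.1 0 c = 0) →
      (∀ c : Nat, 1 ≤ c → (c:Int) < d + 1 → (1:Int) < n + 1 → pvCellN st.1 1 c = 1) →
      pvColGood (pvColOf st.1 d1) n →
      (PySem.List.pyRange d1 (d+1) 1).foldl
        (fun st d1 => pvWhileA n d1 (2*n+4).toNat 2 1 st) st
        = (PySem.List.pyRange d1 (d+1) 1).foldl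
            (fun st d1 => (PySem.List.pyRange 2 (n+1) 1).foldl
              (pvColStepB (pvColOf st.1 d1) d1) st) st := by
  intro k
  induction k with
  | zero =>
    intro d1 st hk hd1 hs1 hs2 h0 h1 hcg
    rw [show PySem.List.pyRange d1 (d+1) 1 = [] from PySem.List.pyRange_one_eq_nil (by omega)]
    rfl
  | succ k ih =>
    intro d1 st hk hd1 hs1 hs2 h0 h1 hcg
    have hlt : d1 < d + 1 := by omega
    rw [PySem.List.pyRange_one_cons hlt, List.foldl_cons, List.foldl_cons]
    have hstep : pvWhileA n d1 (2*n+4).toNat 2 1 st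
        = (PySem.List.pyRange 2 (n+1) 1).foldl (pvColStepB (pvColOf st.1 d1) d1) st := by
      by_cases hn2 : n < 2
      · rw [whileA_triv n d1 hn2,
          show PySem.List.pyRange 2 (n+1) 1 = [] from PySem.List.pyRange_one_eq_nil (by omega)]
        rfl
      · exact dp_inner n d1 (pvColOf st.1 d1) hd1 hcg (2*n+4).toNat 2 1 st (by omega) (by omega)
          (by omega) (by omega) (fun k' hk1 hk2 => absurd hk2 (by omega)) rfl (by omega)
    rw [hstep]
    obtain ⟨hb1, hb2, hbc1, hbc2⟩ := b_fold_char n d1 (pvColOf st.1 d1) hd1 hlt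
      (n - 1).toNat 2 st (by omega) le_rfl hs1 hs2
    set st' := (PySem.List.pyRange 2 (n+1) 1).foldl (pvColStepB (pvColOf st.1 d1) d1) st
      with hst'
    have h0' : ∀ c : Nat, pvCellN st'.1 0 c = 0 := fun c => by
      rw [hst', hbc1 0 c, if_neg (by omega)]; exact h0 c
    have h1' : ∀ c : Nat, 1 ≤ c → (c:Int) < d + 1 → (1:Int) < n + 1 → pvCellN st'.1 1 c = 1 :=
      fun c hc1 hc2 hn1 => by
        rw [hst', hbc1 1 c, if_neg (by omega)]; exact h1 c hc1 hc2 hn1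
    have hval : ∀ r : Nat, pvCellN st'.1 r d1.toNat =
        if 2 ≤ (r:Int) ∧ (r:Int) < n + 1 then (pvCellB (pvColOf st.1 d1) (r:Int)).1
        else pvCellN st.1 r d1.toNat := by
      intro r
      rw [hst', hbc1 r d1.toNat]
      by_cases h : 2 ≤ (r:Int) ∧ (r:Int) < n + 1
      · rw [if_pos (by omega), if_pos h]
      · rw [if_neg (by omega), if_neg h]
    have hgood : pvColGood (pvColOf st'.1 (d1+1)) n := by
      have hbr : ∀ x : Int, 0 ≤ x → PySem.List.pyGetD (pvColOf st'.1 (d1+1)) x 0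
          = pvCellN st'.1 x.toNat d1.toNat := by
        intro x hx
        rw [PySem.List.pyGetD_of_nonneg _ 0 hx, colOf_getD _ (by omega : (1:Int) ≤ d1+1)]
        have he : (d1 + 1 - 1).toNat = d1.toNat := by omega
        rw [he]
      refine ⟨by rw [colOf_length, hb1.1], ?_, ?_⟩
      · intro x hx
        rw [hbr x hx, hval x.toNat]
        by_cases hin : 2 ≤ ((x.toNat : Nat):Int) ∧ ((x.toNat : Nat):Int) < n + 1
        · rw [if_pos hin]
          have := pvCell_ge_one hcg hin.1 (by omega)
          omega
        · rw [if_neg hin]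
          by_cases hx0 : x.toNat = 0
          · rw [hx0, h0]
          · by_cases hx1 : x.toNat = 1
            · by_cases hn1 : (1:Int) < n + 1
              · rw [hx1, h1 d1.toNat (by omega) (by omega) hn1]
                norm_num
              · rw [pvCellN_oor hs1 (by omega)]
            · rw [pvCellN_oor hs1 (by omega)]
      · intro x y hx hxy hyn
        rw [hbr x hx, hbr y (by omega)]
        refine mono_chain (fun r => pvCellN st'.1 r d1.toNat) n ?_ (y-x).toNat x y rfl hx hxy hyn
        intro r hr
        simp only
        rw [hval r, hval (r+1)]
        have hcast : ((r+1 : Nat):Int) = (r:Int) + 1 := by push_cast; ring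
        rw [hcast]
        by_cases h2r : 2 ≤ (r:Int)
        · rw [if_pos ⟨h2r, by omega⟩, if_pos ⟨by omega, by omega⟩]
          exact pvCell_mono hcg (by omega) (by omega)
        · by_cases hr1 : (r:Int) = 1
          · rw [if_neg (by omega), if_pos ⟨by omega, by omega⟩]
            have hr1' : r = 1 := by omega
            subst hr1'
            rw [h1 d1.toNat (by omega) (by omega) (by omega)]
            have := pvCell_ge_one hcg (n1 := ((1:Nat):Int) + 1) (by norm_num) (by omega)
            omega
          · have hr0 : r = 0 := by omega
            subst hr0
            rw [if_neg (by omega), if_neg (by omega)]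
            rw [h0 d1.toNat, h1 d1.toNat (by omega) (by omega) (by omega)]
            norm_num
    exact ih (d1+1) st' (by omega) (by omega) hb1 hb2 h0' h1' hgood

theorem pvBase_nonneg (r c : Nat) : 0 ≤ pvBase r c := by
  unfold pvBase; split_ifs <;> norm_num

theorem pvBase_col1 (r : Nat) : pvBase r 1 = if r = 0 then 0 else if r = 1 then 1 else 9999 := by
  unfold pvBase
  by_cases h0 : r = 0
  · simp [h0]
  · rw [if_neg h0, if_neg h0]
    by_cases h1 : r = 1
    · subst h1; norm_num
    · rw [if_neg h1]
      have h2 : 2 ≤ r := by omega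
      rw [if_neg (by push_cast; omega)]
      have hlog : pvLogLt ((1:Nat):Int) (r:Int) = true := by
        simp only [pvLogLt, Bool.or_eq_true, decide_eq_true_eq]
        left; left
        have he : (((1:Nat):Int)).toNat = 1 := by norm_num
        rw [he]
        push_cast
        omega
      rw [if_pos hlog]

-- the column of the base table used first (column 1)
theorem init_col_good (n d : Int) (hd : 2 ≤ d) :
    pvColGood (pvColOf (pvInitB n d).1 2) n := by
  obtain ⟨hs1, hdiag, hcell⟩ := initB_char n d
  have hbridge : ∀ x : Int, 0 ≤ x → PySem.List.pyGetD (pvColOf (pvInitB n d).1 2) x 0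
      = pvCellN (pvInitB n d).1 x.toNat 1 := by
    intro x hx
    rw [PySem.List.pyGetD_of_nonneg _ 0 hx, colOf_getD _ (by omega : (1:Int) ≤ 2)]
    norm_num
  refine ⟨by rw [colOf_length, hs1.1], ?_, ?_⟩
  · intro x hx
    rw [hbridge x hx, hcell]
    split_ifs with h
    · exact pvBase_nonneg _ _
    · exact le_rfl
  · intro x y hx hxy hyn
    rw [hbridge x hx, hbridge y (by omega), hcell, hcell]
    have hxr : x.toNat < (n+1).toNat := by omega
    have hyr : y.toNat < (n+1).toNat := by omega
    have hdN : (1:Nat) < (d+1).toNat := by omega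
    rw [if_pos ⟨hxr, hdN⟩, if_pos ⟨hyr, hdN⟩, pvBase_col1, pvBase_col1]
    split_ifs <;> omega

-- ===== VERDICT (by name: the statement is the Claim_ definition above) =====
theorem minEggsAlgo3_spec : Claim_equal_minEggsAlgo3 := by
  intro n d _
  unfold Spec_minEggsAlgo3 minEggsAlgo3 minEggsAlgo3_alt
  rw [init_eq]
  by_cases hd : d < 2
  · rw [show PySem.List.pyRange 2 (d+1) 1 = [] from PySem.List.pyRange_one_eq_nil (by omega)]
    rfl
  · obtain ⟨hs1, hdiag, hcell⟩ := initB_char n d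
    have hs2 : pvShape (pvInitB n d).2 (n+1).toNat (d+1).toNat := by rw [hdiag]; exact hs1
    refine outer_eq n d (d - 1).toNat 2 (pvInitB n d) (by omega) le_rfl hs1 hs2 ?_ ?_ ?_
    · intro c
      rw [hcell 0 c]
      by_cases h : 0 < (n+1).toNat ∧ c < (d+1).toNat
      · rw [if_pos h]; rfl
      · rw [if_neg h]
    · intro c hc1 hc2 hn1
      rw [hcell 1 c, if_pos (by omega)]
      unfold pvBase
      rw [if_neg (by omega), if_pos (by omega)]
    · exact init_col_good n d (by omega)
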